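-- pv_equiv track=rewrite | github.com/mt4110/maakie-brainlab | scripts/ops/s26_reliability_report.py | count_reason_codes
-- ===== SOURCE A (Python) =====
-- from typing import Any, Dict, List
--
-- def count_reason_codes(cases: List[Dict[str, Any]]) -> Dict[str, int]:
--     counts: Dict[str, int] = {}
--     for row in cases:
--         code = str(row.get("reason_code") or "")
--         if not code:
--             continue
--         counts[code] = int(counts.get(code, 0)) + 1
--     return dict(sorted(counts.items(), key=lambda x: x[0]))
-- ===== SOURCE B (Python) =====
-- from itertools import groupby
-- from typing import Any, Dict, List
--
-- def count_reason_codes(cases: List[Dict[str, Any]]) -> Dict[str, int]: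
--     codes: List[str] = []
--     for row in cases:
--         code = str(row.get("reason_code") or "")
--         if code:
--             codes.append(code)
--     codes.sort()
--     return {k: sum(1 for _ in g) for k, g in groupby(codes)}
-- ===== Notes on version B (the rewrite author's own statement) =====
-- stated objective: alternative
-- what changed: Replaces the hash-count-then-sort-keys dict with collecting the nonempty cleaned codes into a list, sorting it, and counting run lengths of equal adjacent codes (itertools.groupby) to build the sorted result.
import Mathlib
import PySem

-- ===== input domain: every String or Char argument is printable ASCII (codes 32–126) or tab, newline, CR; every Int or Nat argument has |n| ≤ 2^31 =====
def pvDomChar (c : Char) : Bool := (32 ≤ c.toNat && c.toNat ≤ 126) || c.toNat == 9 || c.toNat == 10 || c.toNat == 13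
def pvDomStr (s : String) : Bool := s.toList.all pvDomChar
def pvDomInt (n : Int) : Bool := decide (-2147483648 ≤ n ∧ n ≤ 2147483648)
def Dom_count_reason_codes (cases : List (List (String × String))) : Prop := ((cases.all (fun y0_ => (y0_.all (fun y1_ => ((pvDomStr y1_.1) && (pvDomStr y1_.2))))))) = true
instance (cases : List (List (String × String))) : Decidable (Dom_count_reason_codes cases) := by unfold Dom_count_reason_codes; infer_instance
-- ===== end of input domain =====

-- B collects the nonempty cleaned reason codes into a list, sorts it, and counts run lengths
-- of adjacent equal codes instead of hash-counting then sorting the keys (alternative algorithm, same result).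


-- ===== PORT A =====
-- code = str(row.get("reason_code") or ""): values are strings, so this is lookup with default ""
def count_reason_codes (cases : List (List (String × String))) : List (String × Int) :=
  let counts : PySem.Dict String Int :=
    cases.foldl (fun counts row =>
      let code := (PySem.Dict.mk row).getD "reason_code" ""
      if code = "" then counts
      else counts.insert code (counts.getD code 0 + 1)) PySem.Dict.empty
  PySem.List.sorted counts.items (fun x => x.1) false

-- ===== PORT B =====
-- itertools.groupby over the sorted list: each step takes the leading run of the head element
def groupRuns : List String → List (String × Int)
  | [] => []
  | a :: rest =>
    (a, 1 + ((rest.takeWhile (fun x => x == a)).length : Int)) ::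
      groupRuns (rest.dropWhile (fun x => x == a))
termination_by l => l.length
decreasing_by
  exact Nat.lt_succ_of_le (List.length_dropWhile_le _ _)

def count_reason_codes_alt (cases : List (List (String × String))) : List (String × Int) :=
  let codes : List String :=
    cases.foldl (fun acc row =>
      let code := (PySem.Dict.mk row).getD "reason_code" ""
      if code = "" then acc else acc ++ [code]) []
  groupRuns (PySem.List.sorted codes (fun x => x) false)

-- ===== PRECONDITION & SPEC =====
def Spec_count_reason_codes (cases : List (List (String × String))) (out : List (String × Int)) : Prop := out = count_reason_codes_alt cases
instance (cases : List (List (String × String))) (out : List (String × Int)) : Decidable (Spec_count_reason_codes cases out) := by unfold Spec_count_reason_codes; infer_instance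

-- ===== CLAIM (what is proved, stated in full; the proofs are below) =====
def Claim_equal_count_reason_codes : Prop := ∀ (cases : List (List (String × String))), Dom_count_reason_codes cases → Spec_count_reason_codes cases (count_reason_codes cases)

-- ===== LEMMAS AND PROOFS =====

-- the cleaned nonempty codes, one pass
def codesOf (cases : List (List (String × String))) : List String :=
  cases.filterMap (fun row =>
    let c := (PySem.Dict.mk row).getD "reason_code" ""
    if c = "" then none else some c)

theorem foldA_eq (cases : List (List (String × String))) :
    ∀ d : PySem.Dict String Int,
      cases.foldl (fun counts row =>
        let code := (PySem.Dict.mk row).getD "reason_code" ""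
        if code = "" then counts
        else counts.insert code (counts.getD code 0 + 1)) d
      = (codesOf cases).foldl (fun d x => d.insert x (d.getD x 0 + 1)) d := by
  induction cases with
  | nil => intro d; rfl
  | cons row rest ih =>
    intro d
    simp only [codesOf, List.filterMap_cons, List.foldl_cons]
    by_cases h : (PySem.Dict.mk row).getD "reason_code" "" = ""
    · simp [h, ih, codesOf]
    · simp [h, ih, codesOf]

theorem foldB_eq (cases : List (List (String × String))) :
    ∀ acc : List String,
      cases.foldl (fun acc row =>
        let code := (PySem.Dict.mk row).getD "reason_code" ""
        if code = "" then acc else acc ++ [code]) acc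
      = acc ++ codesOf cases := by
  induction cases with
  | nil => intro acc; simp [codesOf]
  | cons row rest ih =>
    intro acc
    simp only [codesOf, List.filterMap_cons, List.foldl_cons]
    by_cases h : (PySem.Dict.mk row).getD "reason_code" "" = ""
    · simp [h, ih, codesOf]
    · simp [h, ih, codesOf]

theorem dropWhile_gt (a : String) :
    ∀ l : List String, l.Pairwise (· ≤ ·) → (∀ x ∈ l, a ≤ x) →
      ∀ x ∈ l.dropWhile (fun y => y == a), a < x := by
  intro l
  induction l with
  | nil => intro _ _ x hx; simp [List.dropWhile] at hx
  | cons b l' ih =>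
    intro hp hle x hx
    rcases List.pairwise_cons.mp hp with ⟨hb, hp'⟩
    by_cases hba : b = a
    · rw [List.dropWhile_cons_of_pos (by simp [hba])] at hx
      exact ih hp' (fun y hy => hle y (List.mem_cons_of_mem _ hy)) x hx
    · rw [List.dropWhile_cons_of_neg (by simp [hba])] at hx
      have hab : a < b := lt_of_le_of_ne (hle b (List.mem_cons_self)) (Ne.symm hba)
      rcases List.mem_cons.mp hx with hx | hx
      · exact hx ▸ hab
      · exact lt_of_lt_of_le hab (hb x hx)

theorem groupRuns_char (s : List String) (hs : s.Pairwise (· ≤ ·)) :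
    (groupRuns s).Pairwise (fun p q => p.1 < q.1) ∧
    ∀ p : String × Int, p ∈ groupRuns s ↔ (p.1 ∈ s ∧ p = (p.1, (s.count p.1 : Int))) := by
  induction s using groupRuns.induct with
  | case1 => simp [groupRuns]
  | case2 a rest ih =>
    rcases List.pairwise_cons.mp hs with ⟨hb, hp'⟩
    set t := rest.takeWhile (fun x => x == a) with ht
    set r := rest.dropWhile (fun x => x == a) with hr
    have hr_pw : r.Pairwise (· ≤ ·) := List.Pairwise.sublist (List.dropWhile_sublist _) hp'
    have hgt : ∀ x ∈ r, a < x := dropWhile_gt a rest hp' hb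
    have hanr : a ∉ r := fun h => lt_irrefl a (hgt a h)
    obtain ⟨ihP, ihM⟩ := ih hr_pw
    have hsplit : rest = t ++ r := (List.takeWhile_append_dropWhile).symm
    have hta : ∀ x ∈ t, x = a := fun x hx => by
      have := List.mem_takeWhile_imp hx; simpa using this
    have hcount_a : (a :: rest).count a = 1 + t.length := by
      rw [hsplit, List.count_cons_self, List.count_append]
      have h1 : t.count a = t.length := List.count_eq_length.mpr (fun b hbt => (hta b hbt).symm)
      have h2 : r.count a = 0 := List.count_eq_zero.mpr hanr
      omega
    have hcount_ne : ∀ c, c ≠ a → (a :: rest).count c = r.count c := by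
      intro c hc
      rw [hsplit]
      have h1 : t.count c = 0 := List.count_eq_zero.mpr (fun h => hc (hta c h))
      simp [List.count_cons, List.count_append, h1]
      exact fun e => hc e.symm
    have hgr : groupRuns (a :: rest) = (a, 1 + (t.length : Int)) :: groupRuns r := by
      rw [groupRuns]
    constructor
    · rw [hgr]
      refine List.pairwise_cons.mpr ⟨?_, ihP⟩
      intro q hq
      have := (ihM q).mp hq
      exact hgt q.1 this.1
    · intro p
      rw [hgr, List.mem_cons]
      constructor
      · intro hp
        rcases hp with hp | hp
        · subst hp
          refine ⟨List.mem_cons_self, ?_⟩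
          simp only [hcount_a]
          push_cast
          ring_nf
        · obtain ⟨h1, h2⟩ := (ihM p).mp hp
          have hpne : p.1 ≠ a := fun e => lt_irrefl a (e ▸ hgt p.1 h1)
          refine ⟨List.mem_cons_of_mem _ ((hsplit ▸ List.mem_append_right t h1)), ?_⟩
          rw [hcount_ne p.1 hpne]; exact h2
      · rintro ⟨h1, h2⟩
        by_cases hpa : p.1 = a
        · refine Or.inl ?_
          rw [h2, hpa, hcount_a]
          push_cast; ring_nf
        · refine Or.inr ?_
          rcases List.mem_cons.mp h1 with h | h
          · exact absurd h hpa
          · rw [hsplit] at h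
            rcases List.mem_append.mp h with h | h
            · exact absurd (hta _ h) hpa
            · exact (ihM p).mpr ⟨h, by rw [h2, hcount_ne p.1 hpa]⟩

-- ===== VERDICT (by name: the statement is the Claim_ definition above) =====
theorem count_reason_codes_spec : Claim_equal_count_reason_codes := by
  intro cases _
  unfold Spec_count_reason_codes
  simp only [count_reason_codes, count_reason_codes_alt]
  rw [foldA_eq, foldB_eq, PySem.Dict.foldl_insert_getD_add_one_eq_counter,
      PySem.Dict.items_counter, List.nil_append]
  set codes := codesOf cases with hcodes
  set s := PySem.List.sorted codes (fun x => x) false with hset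
  have hs_pw : s.Pairwise (· ≤ ·) := by
    simpa using PySem.List.sorted_pairwise codes (fun x => x)
  obtain ⟨hP, hM⟩ := groupRuns_char s hs_pw
  have hperm_s : s.Perm codes := PySem.List.sorted_perm codes (fun x => x) false
  refine PySem.List.sorted_eq_of_perm_of_pairwise_lt _ _ _ ?_ hP
  refine (List.perm_ext_iff_of_nodup ?_ ?_).mpr ?_
  · have hne : (groupRuns s).Pairwise (fun p q => p ≠ q) :=
      hP.imp (fun {p q} (h : p.1 < q.1) => fun (e : p = q) => absurd (e ▸ h) (lt_irrefl _))
    exact hne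
  · exact (PySem.Set.nodup_ofList codes).map
      (fun a b h => congrArg Prod.fst h)
  · intro p
    rw [hM p, List.mem_map]
    constructor
    · rintro ⟨h1, h2⟩
      refine ⟨p.1, (PySem.Set.mem_ofList _ _).mpr (hperm_s.mem_iff.mp h1), ?_⟩
      rw [h2, hperm_s.count_eq]
    · rintro ⟨k, hk, hfk⟩
      have hk' : k ∈ codes := (PySem.Set.mem_ofList _ _).mp hk
      have hp1 : p.1 = k := by rw [← hfk]
      subst hp1
      exact ⟨hperm_s.mem_iff.mpr hk', by rw [← hfk, hperm_s.count_eq]⟩
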